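-- pv_equiv track=rewrite | github.com/radicalalpaca/python-pc | lectures/logic/formulasplit.py | split_formula
-- ===== SOURCE A (Python) =====
-- def split_formula(string_formula):
--     bracket_count = 0
--     i = 0
--     for character in string_formula:
--         i += 1
--         if character == "(":
--             bracket_count += 1
--             continue
--         elif character == ")":
--             bracket_count -= 1
--         if bracket_count == 1:
--             return string_formula[1:i], string_formula[i + 1:-1]
-- ===== SOURCE B (Python) =====
-- def split_formula(string_formula):
--     # pass 1: cumulative bracket depth after each character
--     depths = []
--     d = 0
--     for c in string_formula:
--         d += 1 if c == "(" else (-1 if c == ")" else 0)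
--         depths.append(d)
--     # pass 2: first index whose depth is 1 on a non-'(' character
--     for j, (c, dep) in enumerate(zip(string_formula, depths)):
--         if dep == 1 and c != "(":
--             return string_formula[1:j + 1], string_formula[j + 2:-1]
-- ===== Notes on version B (the rewrite author's own statement) =====
-- stated objective: alternative
-- what changed: Replaced A's single stateful scan (running bracket counter with an early return inside the loop) by two separately-shaped passes: first build the full cumulative-depth table, then search it for the first index with depth 1 on a character that is not an open parenthesis, and slice there.
import Mathlib
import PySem

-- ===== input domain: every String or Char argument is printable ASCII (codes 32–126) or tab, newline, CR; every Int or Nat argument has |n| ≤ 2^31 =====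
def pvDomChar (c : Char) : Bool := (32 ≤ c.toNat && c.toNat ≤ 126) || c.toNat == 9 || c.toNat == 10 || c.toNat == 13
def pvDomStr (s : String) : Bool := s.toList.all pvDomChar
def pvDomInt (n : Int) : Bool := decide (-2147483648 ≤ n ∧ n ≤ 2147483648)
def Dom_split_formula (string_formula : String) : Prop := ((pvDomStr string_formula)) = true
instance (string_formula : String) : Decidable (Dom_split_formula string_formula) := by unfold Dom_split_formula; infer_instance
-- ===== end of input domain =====

-- B replaces A's single stateful scan by a precomputed cumulative-depth table plus a separate
-- index search over it (alternative decomposition; same cost). Return values are identical.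

-- ===== PORT A =====
-- A's for-loop: bracket_count and the 1-based counter i are the loop state; the early
-- 'return' inside the loop becomes returning 'some' from the recursion.
def split_formula_loop (s : String) (cs : List Char) (bracket_count : Int) (i : Int) :
    Option (String × String) :=
  match cs with
  | [] => none
  | c :: rest =>
    let i' := i + 1
    if c = '(' then
      split_formula_loop s rest (bracket_count + 1) i'   -- continue
    else
      let bc' := if c = ')' then bracket_count - 1 else bracket_count
      if bc' = 1 then
        some (PySem.Str.slice s (some 1) (some i'), PySem.Str.slice s (some (i' + 1)) (some (-1)))
      else
        split_formula_loop s rest bc' i'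

def split_formula (string_formula : String) : Option (String × String) :=
  split_formula_loop string_formula string_formula.toList 0 0

-- ===== PORT B =====
-- pass 1 of Source B: the cumulative depth after each character
def split_formula_depths (cs : List Char) (d : Int) : List Int :=
  match cs with
  | [] => []
  | c :: rest =>
    let d' := d + (if c = '(' then 1 else if c = ')' then -1 else 0)
    d' :: split_formula_depths rest d'

-- pass 2 of Source B: enumerate over the characters zipped with their depths
def split_formula_search (s : String) (zs : List (Char × Int)) (j : Int) :
    Option (String × String) :=
  match zs with
  | [] => none
  | (c, dep) :: rest =>
    if dep = 1 ∧ c ≠ '(' then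
      some (PySem.Str.slice s (some 1) (some (j + 1)), PySem.Str.slice s (some (j + 2)) (some (-1)))
    else
      split_formula_search s rest (j + 1)

def split_formula_alt (string_formula : String) : Option (String × String) :=
  split_formula_search string_formula
    (List.zip string_formula.toList (split_formula_depths string_formula.toList 0)) 0

-- ===== PRECONDITION & SPEC =====
def Spec_split_formula (string_formula : String) (out : Option (String × String)) : Prop := out = split_formula_alt string_formula
instance (string_formula : String) (out : Option (String × String)) : Decidable (Spec_split_formula string_formula out) := by unfold Spec_split_formula; infer_instance

-- ===== CLAIM (what is proved, stated in full; the proofs are below) =====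
def Claim_equal_split_formula : Prop := ∀ (string_formula : String), Dom_split_formula string_formula → Spec_split_formula string_formula (split_formula string_formula)

-- ===== LEMMAS AND PROOFS =====

-- A's loop at state (bc, i) computes exactly B's search over the zipped depth table built from bc.
lemma split_formula_loop_eq_search (s : String) (cs : List Char) (bc i : Int) :
    split_formula_loop s cs bc i =
      split_formula_search s (List.zip cs (split_formula_depths cs bc)) i := by
  induction cs generalizing bc i with
  | nil => simp [split_formula_loop, split_formula_depths, split_formula_search]
  | cons c rest ih =>
    simp only [split_formula_depths, split_formula_loop, List.zip_cons_cons,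
      split_formula_search]
    by_cases hpar : c = '('
    · simp [hpar, ih]
    · by_cases hclose : c = ')'
      · by_cases h1 : bc + -1 = 1
        · simp [hclose, h1, show i + 1 + 1 = i + 2 from by ring,
            show bc - 1 = bc + -1 from by ring]
        · simp [hclose, h1, ih, show bc - 1 = bc + -1 from by ring]
      · by_cases h1 : bc = 1
        · simp [hpar, hclose, h1, show i + 1 + 1 = i + 2 from by ring]
        · simp [hpar, hclose, h1, ih]

-- ===== VERDICT (by name: the statement is the Claim_ definition above) =====
theorem split_formula_spec : Claim_equal_split_formula := by
  intro s _
  unfold Spec_split_formula split_formula split_formula_alt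
  exact split_formula_loop_eq_search s s.toList 0 0
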